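-- pv_equiv track=rewrite | github.com/SuperposedWave/SlimeECC | examples/ECC/ecc_reward.py | compute_minimum_distance
-- ===== SOURCE A (Python) =====
-- import math
--
-- MAX_ENUM_K = 20
--
-- def compute_minimum_distance(matrix: list[list[int]]) -> int:
--     k = len(matrix)
--     if k == 0:
--         raise ValueError("Generator matrix must contain at least one row.")
--     if k > MAX_ENUM_K:
--         raise ValueError(
--             f"Generator matrix has k={k}, which is too large for exhaustive minimum-distance enumeration. "
--             f"Current limit is k<={MAX_ENUM_K}."
--         )
--
--     min_weight = math.inf
--     for mask in range(1, 1 << k):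
--         codeword = [0] * len(matrix[0])
--         for row_idx in range(k):
--             if (mask >> row_idx) & 1:
--                 codeword = [a ^ b for a, b in zip(codeword, matrix[row_idx], strict=False)]
--         weight = sum(codeword)
--         if 0 < weight < min_weight:
--             min_weight = weight
--             if min_weight == 1:
--                 return 1
--
--     if min_weight is math.inf:
--         raise ValueError("All generated codewords are zero; generator matrix is degenerate.")
--     return int(min_weight)
-- ===== SOURCE B (Python) =====
-- MAX_ENUM_K = 20
--
-- def compute_minimum_distance(matrix: list[list[int]]) -> int:
--     k = len(matrix)
--     if k == 0:
--         raise ValueError("Generator matrix must contain at least one row.")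
--     if k > MAX_ENUM_K:
--         raise ValueError(
--             f"Generator matrix has k={k}, which is too large for exhaustive minimum-distance enumeration. "
--             f"Current limit is k<={MAX_ENUM_K}."
--         )
--
--     best = None
--
--     def dfs(i: int, codeword: list[int]) -> None:
--         nonlocal best
--         if i == k:
--             weight = sum(codeword)
--             if 0 < weight and (best is None or weight < best):
--                 best = weight
--             return
--         dfs(i + 1, codeword)  # exclude row i
--         dfs(i + 1, [a ^ b for a, b in zip(codeword, matrix[i])])  # include row i
--
--     dfs(0, [0] * len(matrix[0]))
--
--     if best is None:
--         raise ValueError("All generated codewords are zero; generator matrix is degenerate.")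
--     return best
-- ===== Notes on version B (the rewrite author's own statement) =====
-- stated objective: faster
-- what changed: A rebuilds every codeword from scratch for each of the 2^k masks (k row-XORs per mask); B enumerates the subsets by a depth-first recursion over the rows that extends the current partial XOR once per branch, so each codeword costs one row-XOR.
import Mathlib
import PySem

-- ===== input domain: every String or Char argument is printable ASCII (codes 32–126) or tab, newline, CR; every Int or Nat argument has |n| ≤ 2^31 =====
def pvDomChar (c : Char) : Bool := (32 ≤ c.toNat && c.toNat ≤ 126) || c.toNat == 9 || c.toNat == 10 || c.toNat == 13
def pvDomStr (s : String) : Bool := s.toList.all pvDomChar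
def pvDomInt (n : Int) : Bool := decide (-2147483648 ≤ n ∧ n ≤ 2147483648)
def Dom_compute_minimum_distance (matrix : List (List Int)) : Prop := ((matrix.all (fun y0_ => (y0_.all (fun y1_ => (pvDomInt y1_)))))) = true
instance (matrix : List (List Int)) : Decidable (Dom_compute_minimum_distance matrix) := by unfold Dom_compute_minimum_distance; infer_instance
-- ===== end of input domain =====

-- B replaces A's per-mask rebuild of each codeword by a DFS over the rows that extends the
-- current partial XOR once per branch (measured faster); same return value wherever A returns.

-- [a ^ b for a, b in zip(xs, ys)] — identical comprehension in both Pythons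
def pvZipXor (xs ys : List Int) : List Int := (xs.zip ys).map (fun p => PySem.Int.bxor p.1 p.2)

-- ===== PORT A =====
-- the 'for mask in range(1, 1 << k)' loop; min_weight : Option Int (none = math.inf);
-- the early 'return 1' is the branch that stops recursing; 0 on the raise path (excluded by Pre_)
def pvLoopA (matrix : List (List Int)) (k : Int) : List Int → Option Int → Int
  | [], mw => (match mw with | none => 0 | some w => w)
  | mask :: rest, mw =>
      let codeword := (PySem.List.pyRange 0 k 1).foldl
        (fun cw r => if PySem.Int.band (mask >>> r.toNat) 1 ≠ 0
                     then pvZipXor cw (PySem.List.pyGetD matrix r []) else cw)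
        (List.replicate (PySem.List.pyGetD matrix 0 []).length 0)
      let w := codeword.sum
      let pass : Bool := match mw with | none => decide (0 < w) | some b => decide (0 < w ∧ w < b)
      if pass then (if w = 1 then 1 else pvLoopA matrix k rest (some w))
      else pvLoopA matrix k rest mw

def compute_minimum_distance (matrix : List (List Int)) : Int :=
  let k : Int := matrix.length
  if k = 0 then 0            -- Python raises ValueError (excluded by Pre_)
  else if 20 < k then 0      -- Python raises ValueError (excluded by Pre_)
  else pvLoopA matrix k (PySem.List.pyRange 1 ((1 : Int) <<< matrix.length) 1) none

-- ===== PORT B =====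
-- dfs(i, codeword): i ↦ rows = matrix.drop i; the 'nonlocal best' accumulator is threaded through
def pvDfsB : List (List Int) → List Int → Option Int → Option Int
  | [], cw, best =>
      let w := cw.sum
      let pass : Bool := match best with | none => decide (0 < w) | some b => decide (0 < w ∧ w < b)
      if pass then some w else best
  | r :: rest, cw, best => pvDfsB rest (pvZipXor cw r) (pvDfsB rest cw best)

def compute_minimum_distance_alt (matrix : List (List Int)) : Int :=
  if matrix.length = 0 then 0       -- Python raises ValueError (excluded by Pre_)
  else if 20 < matrix.length then 0 -- Python raises ValueError (excluded by Pre_)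
  else match pvDfsB matrix (List.replicate (PySem.List.pyGetD matrix 0 []).length 0) none with
       | none => 0                  -- Python raises ValueError (excluded by Pre_)
       | some b => b

-- ===== PRECONDITION & SPEC =====
-- XOR of the subset of rows selected by the bits of m (bit 0 = first row), with zip truncation
def pvSubXor : List (List Int) → Nat → List Int → List Int
  | [], _, cw => cw
  | r :: rest, m, cw => pvSubXor rest (m / 2) (if m % 2 = 1 then pvZipXor cw r else cw)

-- A raises ValueError when k = 0, when k > 20, and when no subset of rows yields a codeword of
-- positive weight ("degenerate matrix"); Pre_ excludes exactly those inputs (B raises there too).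
def Pre_compute_minimum_distance (matrix : List (List Int)) : Prop :=
  1 ≤ matrix.length ∧ matrix.length ≤ 20 ∧
  ∃ m ∈ List.range (2 ^ matrix.length),
    0 < (pvSubXor matrix m (List.replicate (PySem.List.pyGetD matrix 0 []).length 0)).sum
instance (matrix : List (List Int)) : Decidable (Pre_compute_minimum_distance matrix) := by
  unfold Pre_compute_minimum_distance; infer_instance

def pvWitness_compute_minimum_distance : List (List Int) := [[1, 1], [0, 1]]

def Spec_compute_minimum_distance (matrix : List (List Int)) (out : Int) : Prop := out = compute_minimum_distance_alt matrix
instance (matrix : List (List Int)) (out : Int) : Decidable (Spec_compute_minimum_distance matrix out) := by unfold Spec_compute_minimum_distance; infer_instance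

-- ===== CLAIM (what is proved, stated in full; the proofs are below) =====
def Claim_equal_compute_minimum_distance : Prop := ∀ (matrix : List (List Int)), Dom_compute_minimum_distance matrix → Pre_compute_minimum_distance matrix → Spec_compute_minimum_distance matrix (compute_minimum_distance matrix)

-- ===== LEMMAS AND PROOFS =====

-- the running-minimum update both loops perform on one weight
def pvUpd (b : Option Int) (w : Int) : Option Int :=
  let pass : Bool := match b with | none => decide (0 < w) | some v => decide (0 < w ∧ w < v)
  if pass then some w else b

-- the weights of the 2^k leaves of B's DFS
def pvWeights : List (List Int) → List Int → List Int
  | [], cw => [cw.sum]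
  | r :: rest, cw => pvWeights rest cw ++ pvWeights rest (pvZipXor cw r)

theorem pvSubXor_zero (rows : List (List Int)) (cw : List Int) : pvSubXor rows 0 cw = cw := by
  induction rows generalizing cw with
  | nil => rfl
  | cons r rest ih => simp [pvSubXor, ih]

theorem pvFold_some_one (l : List Int) : List.foldl pvUpd (some 1) l = some 1 := by
  induction l with
  | nil => rfl
  | cons w t ih =>
      have : pvUpd (some 1) w = some 1 := by
        simp only [pvUpd]
        have : ¬ (0 < w ∧ w < 1) := by omega
        simp [this]
      simp [List.foldl_cons, this, ih]

theorem pvFold_from_some (v : Int) (l : List Int) :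
    List.foldl pvUpd (some v) l
      = some (List.foldl (fun a w => if 0 < w ∧ w < a then w else a) v l) := by
  induction l generalizing v with
  | nil => rfl
  | cons w t ih =>
      by_cases h : 0 < w ∧ w < v
      · simp [List.foldl_cons, pvUpd, h, ih]
      · simp [List.foldl_cons, pvUpd, h, ih]

theorem pvG_pos (l : List Int) (v : Int) (hv : 0 < v) :
    0 < List.foldl (fun a w => if 0 < w ∧ w < a then w else a) v l := by
  induction l generalizing v with
  | nil => simpa using hv
  | cons x s ihs =>
      by_cases hx : 0 < x ∧ x < v
      · simp only [List.foldl_cons, if_pos hx]; exact ihs x hx.1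
      · simp only [List.foldl_cons, if_neg hx]; exact ihs v hv

theorem pvG_char (v : Int) (l : List Int) :
    (List.foldl (fun a w => if 0 < w ∧ w < a then w else a) v l = v
       ∨ List.foldl (fun a w => if 0 < w ∧ w < a then w else a) v l ∈ l)
    ∧ List.foldl (fun a w => if 0 < w ∧ w < a then w else a) v l ≤ v
    ∧ ∀ w ∈ l, 0 < w → List.foldl (fun a w => if 0 < w ∧ w < a then w else a) v l ≤ w := by
  induction l generalizing v with
  | nil => simp
  | cons w t ih =>
      by_cases h : 0 < w ∧ w < v
      · have := ih w
        simp only [List.foldl_cons, if_pos h]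
        refine ⟨?_, ?_, ?_⟩
        · rcases this.1 with h1 | h1
          · exact Or.inr (by simp [h1])
          · exact Or.inr (by simp [h1])
        · omega
        · intro x hx hxpos
          rcases List.mem_cons.mp hx with hx | hx
          · omega
          · exact this.2.2 x hx hxpos
      · have := ih v
        simp only [List.foldl_cons, if_neg h]
        refine ⟨?_, this.2.1, ?_⟩
        · rcases this.1 with h1 | h1
          · exact Or.inl h1
          · exact Or.inr (by simp [h1])
        · intro x hx hxpos
          rcases List.mem_cons.mp hx with hx | hx
          · omega
          · exact this.2.2 x hx hxpos

theorem pvFold_none_eq_none_iff (l : List Int) :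
    List.foldl pvUpd none l = none ↔ ∀ w ∈ l, w ≤ 0 := by
  induction l with
  | nil => simp
  | cons w t ih =>
      by_cases h : 0 < w
      · have h1 : pvUpd none w = some w := by simp [pvUpd, h]
        rw [List.foldl_cons, h1, pvFold_from_some]
        simp only [reduceCtorEq, false_iff]
        intro hall
        have := hall w (by simp)
        omega
      · have h1 : pvUpd none w = none := by simp [pvUpd, h]
        rw [List.foldl_cons, h1, ih]
        constructor
        · intro hall x hx
          rcases List.mem_cons.mp hx with hx | hx
          · omega
          · exact hall x hx
        · intro hall x hx; exact hall x (by simp [hx])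

theorem pvFold_none_eq_some_iff (l : List Int) (m : Int) :
    List.foldl pvUpd none l = some m ↔ (m ∈ l ∧ 0 < m ∧ ∀ w ∈ l, 0 < w → m ≤ w) := by
  induction l with
  | nil => simp
  | cons w t ih =>
      by_cases h : 0 < w
      · have h1 : pvUpd none w = some w := by simp [pvUpd, h]
        rw [List.foldl_cons, h1, pvFold_from_some]
        have hg := pvG_char w t
        constructor
        · intro hsome
          have hm : List.foldl (fun a w => if 0 < w ∧ w < a then w else a) w t = m :=
            by exact Option.some_injective _ hsome
          rw [hm] at hg
          refine ⟨?_, ?_, ?_⟩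
          · rcases hg.1 with h1 | h1
            · simp [h1]
            · simp [h1]
          · -- m = w or m ∈ t with m ≤ w; positivity: g keeps positivity
            -- g's result is positive: every replacement value is positive and v = w > 0
            rw [← hm]
            exact pvG_pos t w h
          · intro x hx hxpos
            rcases List.mem_cons.mp hx with hx | hx
            · omega
            · exact hg.2.2 x hx hxpos
        · rintro ⟨hmem, hmpos, hmin⟩
          congr 1
          have hle1 : m ≤ List.foldl (fun a w => if 0 < w ∧ w < a then w else a) w t := by
            rcases hg.1 with h1 | h1
            · rw [h1]; exact hmin w (by simp) h
            · exact hmin _ (by simp [h1]) (pvG_pos t w h)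
          have hle2 : List.foldl (fun a w => if 0 < w ∧ w < a then w else a) w t ≤ m := by
            rcases List.mem_cons.mp hmem with hm | hm
            · subst hm; exact hg.2.1
            · exact hg.2.2 m hm hmpos
          omega
      · have h1 : pvUpd none w = none := by simp [pvUpd, h]
        rw [List.foldl_cons, h1, ih]
        constructor
        · rintro ⟨hmem, hmpos, hmin⟩
          exact ⟨by simp [hmem], hmpos, fun x hx hxpos => by
            rcases List.mem_cons.mp hx with hx | hx
            · omega
            · exact hmin x hx hxpos⟩
        · rintro ⟨hmem, hmpos, hmin⟩
          rcases List.mem_cons.mp hmem with hm | hm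
          · omega
          · exact ⟨hm, hmpos, fun x hx hxpos => hmin x (by simp [hx]) hxpos⟩

theorem pvFold_none_ext (l1 l2 : List Int) (h : ∀ w, 0 < w → (w ∈ l1 ↔ w ∈ l2)) :
    List.foldl pvUpd none l1 = List.foldl pvUpd none l2 := by
  cases h1 : List.foldl pvUpd none l1 with
  | none =>
      cases h2 : List.foldl pvUpd none l2 with
      | none => rfl
      | some m =>
          exfalso
          obtain ⟨hmem, hmpos, _⟩ := (pvFold_none_eq_some_iff l2 m).1 h2
          have := (pvFold_none_eq_none_iff l1).1 h1 m ((h m hmpos).2 hmem)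
          omega
  | some m =>
      obtain ⟨hmem, hmpos, hmin⟩ := (pvFold_none_eq_some_iff l1 m).1 h1
      cases h2 : List.foldl pvUpd none l2 with
      | none =>
          exfalso
          have := (pvFold_none_eq_none_iff l2).1 h2 m ((h m hmpos).1 hmem)
          omega
      | some m' =>
          obtain ⟨hmem', hmpos', hmin'⟩ := (pvFold_none_eq_some_iff l2 m').1 h2
          have : m ≤ m' := hmin m' ((h m' hmpos').2 hmem') hmpos'
          have : m' ≤ m := hmin' m ((h m hmpos).1 hmem) hmpos
          congr 1; omega

-- B's DFS is the pvUpd-fold over the leaf weights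
theorem pvDfsB_eq (rows : List (List Int)) (cw : List Int) (best : Option Int) :
    pvDfsB rows cw best = List.foldl pvUpd best (pvWeights rows cw) := by
  induction rows generalizing cw best with
  | nil => rfl
  | cons r rest ih => simp [pvDfsB, pvWeights, List.foldl_append, ih]

-- membership in the leaf weights = some subset-XOR weight
theorem pvMem_weights (rows : List (List Int)) (cw : List Int) (w : Int) :
    w ∈ pvWeights rows cw ↔ ∃ m, m < 2 ^ rows.length ∧ w = (pvSubXor rows m cw).sum := by
  induction rows generalizing cw with
  | nil =>
      simp only [pvWeights, List.mem_singleton, List.length_nil, pow_zero]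
      constructor
      · intro h; exact ⟨0, by omega, by simp [pvSubXor, h]⟩
      · rintro ⟨m, hm, h⟩
        have : m = 0 := by omega
        subst this; simp [pvSubXor] at h; exact h
  | cons r rest ih =>
      simp only [pvWeights, List.mem_append, List.length_cons, ih]
      constructor
      · rintro (⟨m, hm, h⟩ | ⟨m, hm, h⟩)
        · exact ⟨2 * m, by rw [pow_succ]; omega, by
            simp only [pvSubXor]
            have h2 : 2 * m % 2 = 0 := by omega
            have h3 : 2 * m / 2 = m := by omega
            simp [h2, h3, h]⟩
        · exact ⟨2 * m + 1, by rw [pow_succ]; omega, by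
            simp only [pvSubXor]
            have h2 : (2 * m + 1) % 2 = 1 := by omega
            have h3 : (2 * m + 1) / 2 = m := by omega
            simp [h2, h3, h]⟩
      · rintro ⟨m, hm, h⟩
        rw [pow_succ] at hm
        by_cases hpar : m % 2 = 1
        · right
          refine ⟨m / 2, by omega, ?_⟩
          simpa only [pvSubXor, if_pos hpar] using h
        · left
          refine ⟨m / 2, by omega, ?_⟩
          simpa only [pvSubXor, if_neg hpar] using h

-- A's inner per-mask fold computes pvSubXor
theorem pvInnerA_eq (rows : List (List Int)) (m : Nat) (cw : List Int) :
    (PySem.List.pyRange 0 rows.length 1).foldl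
      (fun cw r => if PySem.Int.band ((m : Int) >>> r.toNat) 1 ≠ 0
                   then pvZipXor cw (PySem.List.pyGetD rows r []) else cw) cw
    = pvSubXor rows m cw := by
  induction rows generalizing m cw with
  | nil => simp [PySem.List.pyRange_one_eq_nil, pvSubXor]
  | cons x rest ih =>
      have hcons : PySem.List.pyRange 0 ((x :: rest).length : Int) 1
          = 0 :: PySem.List.pyRange 1 ((x :: rest).length : Int) 1 := by
        apply PySem.List.pyRange_one_cons
        simp
      rw [hcons, List.foldl_cons]
      have hhead : (if PySem.Int.band ((m : Int) >>> (((0 : Int).toNat : Int))) 1 ≠ 0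
            then pvZipXor cw (PySem.List.pyGetD (x :: rest) 0 []) else cw)
          = (if m % 2 = 1 then pvZipXor cw x else cw) := by
        have h1 : PySem.Int.band ((m : Int) >>> (((0 : Int).toNat : Int))) 1 = ((m % 2 : Nat) : Int) := by
          have hs : (m : Int) >>> (((0 : Int).toNat : Int)) = (m : Int) := by
            simpa using Int.shiftRight_natCast m 0
          rw [hs, PySem.Int.band_one]
          exact_mod_cast PySem.Int.mod_natCast m 2
        have h2 : PySem.List.pyGetD (x :: rest) 0 [] = x := by
          simp [PySem.List.pyGetD_ofNat']
        rw [h1, h2]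
        by_cases hp : m % 2 = 1
        · simp [hp]
        · have : m % 2 = 0 := by omega
          simp [this]
      rw [hhead]
      have htail : PySem.List.pyRange 1 ((x :: rest).length : Int) 1
          = (List.range rest.length).map (fun j : Nat => 1 + (j : Int)) := by
        rw [PySem.List.pyRange_one]
        have h6 : (((x :: rest).length : Int) - 1).toNat = rest.length := by
          simp
        rw [h6]
      have hsrc : PySem.List.pyRange 0 (rest.length : Int) 1
          = (List.range rest.length).map (fun j : Nat => (0 : Int) + (j : Int)) := by
        rw [PySem.List.pyRange_one]
        have h7 : ((rest.length : Int) - 0).toNat = rest.length := by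
          simp
        rw [h7]
      rw [htail, List.foldl_map]
      have := ih (m / 2) (if m % 2 = 1 then pvZipXor cw x else cw)
      rw [hsrc, List.foldl_map] at this
      rw [pvSubXor, ← this]
      apply PySem.List.foldl_congr_mem
      intro acc j hj
      have hj' : (j : Nat) < rest.length := List.mem_range.mp hj
      have e1 : ((1 : Int) + (j : Int)).toNat = j + 1 := by omega
      have e2 : ((0 : Int) + (j : Int)).toNat = j := by omega
      rw [e1, e2]
      have e3 : (m : Int) >>> ((j + 1 : Nat) : Int) = ((m / 2 : Nat) : Int) >>> ((j : Nat) : Int) := by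
        rw [Int.shiftRight_natCast, Int.shiftRight_natCast]
        rw [Nat.add_comm j 1, Nat.shiftRight_add, Nat.shiftRight_one]
      have e4 : PySem.List.pyGetD (x :: rest) (1 + (j : Int)) [] = PySem.List.pyGetD rest (j : Int) [] := by
        rw [PySem.List.pyGetD_of_nonneg _ _ (by omega), PySem.List.pyGetD_of_nonneg _ _ (by omega), e1]
        simp
      rw [e3, e4]
      simp

-- the weight A computes for one mask
def pvWtA (matrix : List (List Int)) (k mask : Int) : Int :=
  ((PySem.List.pyRange 0 k 1).foldl
    (fun cw r => if PySem.Int.band (mask >>> r.toNat) 1 ≠ 0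
                 then pvZipXor cw (PySem.List.pyGetD matrix r []) else cw)
    (List.replicate (PySem.List.pyGetD matrix 0 []).length 0)).sum

-- A's mask loop is the pvUpd-fold over the per-mask weights, then the final match
theorem pvLoopA_eq (matrix : List (List Int)) (k : Int) (masks : List Int) (mw : Option Int) :
    pvLoopA matrix k masks mw
      = (match List.foldl pvUpd mw (masks.map (pvWtA matrix k)) with
         | none => 0 | some w => w) := by
  induction masks generalizing mw with
  | nil => rfl
  | cons mask rest ih =>
      rw [List.map_cons, List.foldl_cons]
      have hstep : pvLoopA matrix k (mask :: rest) mw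
          = (let w := pvWtA matrix k mask;
             let pass : Bool := match mw with | none => decide (0 < w) | some b => decide (0 < w ∧ w < b)
             if pass then (if w = 1 then 1 else pvLoopA matrix k rest (some w))
             else pvLoopA matrix k rest mw) := rfl
      rw [hstep]
      cases mw with
      | none =>
          by_cases h : 0 < pvWtA matrix k mask
          · by_cases h1 : pvWtA matrix k mask = 1
            · simp [h1, pvUpd, pvFold_some_one]
            · simp [h, h1, pvUpd, ih]
          · simp [h, pvUpd, ih]
      | some b =>
          by_cases h : 0 < pvWtA matrix k mask ∧ pvWtA matrix k mask < b
          · by_cases h1 : pvWtA matrix k mask = 1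
            · have hb : (1 : Int) < b := by omega
              simp [h1, hb, pvUpd, pvFold_some_one]
            · simp [h, h1, pvUpd, ih]
          · simp [h, pvUpd, ih]

theorem pvWtA_eq_subXor (matrix : List (List Int)) (mask : Int) (h : 0 ≤ mask) :
    pvWtA matrix (matrix.length : Int) mask
      = (pvSubXor matrix mask.toNat
          (List.replicate (PySem.List.pyGetD matrix 0 []).length 0)).sum := by
  have hin := pvInnerA_eq matrix mask.toNat
    (List.replicate (PySem.List.pyGetD matrix 0 []).length 0)
  rw [Int.toNat_of_nonneg h] at hin
  unfold pvWtA
  rw [hin]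

theorem pvShiftOne (n : Nat) : (1 : Int) <<< n = 2 ^ n := by
  simp [Int.shiftLeft_eq]

-- ===== VERDICT (by name: the statement is the Claim_ definition above) =====
theorem compute_minimum_distance_spec : Claim_equal_compute_minimum_distance := by
  unfold Claim_equal_compute_minimum_distance
  intro matrix _ hpre
  unfold Pre_compute_minimum_distance at hpre
  obtain ⟨h1, h2, _⟩ := hpre
  unfold Spec_compute_minimum_distance
  unfold compute_minimum_distance compute_minimum_distance_alt
  have hk0 : ¬ ((matrix.length : Int) = 0) := by
    intro h; omega
  have hk20 : ¬ (20 < (matrix.length : Int)) := by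
    intro h; omega
  have hn0 : ¬ (matrix.length = 0) := by omega
  have hn20 : ¬ (20 < matrix.length) := by omega
  simp only [hk0, hk20, hn0, hn20, if_false]
  rw [pvLoopA_eq, pvDfsB_eq]
  have hfold :
      List.foldl pvUpd none
        ((PySem.List.pyRange 1 ((1 : Int) <<< matrix.length) 1).map (pvWtA matrix (matrix.length : Int)))
      = List.foldl pvUpd none
        (pvWeights matrix (List.replicate (PySem.List.pyGetD matrix 0 []).length 0)) := by
    apply pvFold_none_ext
    intro w hw
    constructor
    · intro hmem
      obtain ⟨mask, hmask, hval⟩ := List.mem_map.mp hmem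
      obtain ⟨hlo, hhi⟩ := PySem.List.mem_pyRange_one.mp hmask
      rw [pvShiftOne] at hhi
      have hcast : ((2 ^ matrix.length : Nat) : Int) = (2 : Int) ^ matrix.length := by
        push_cast; ring
      have hm : mask.toNat < 2 ^ matrix.length := by omega
      rw [pvMem_weights]
      exact ⟨mask.toNat, hm, by rw [← hval, pvWtA_eq_subXor matrix mask (by omega)]⟩
    · intro hmem
      obtain ⟨m, hm, hval⟩ := (pvMem_weights matrix _ w).mp hmem
      have hmne : m ≠ 0 := by
        intro h0
        subst h0
        rw [pvSubXor_zero] at hval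
        simp at hval
        omega
      apply List.mem_map.mpr
      refine ⟨(m : Int), PySem.List.mem_pyRange_one.mpr ⟨by omega, ?_⟩, ?_⟩
      · rw [pvShiftOne]
        have hcast : ((2 ^ matrix.length : Nat) : Int) = (2 : Int) ^ matrix.length := by
          push_cast; ring
        omega
      · rw [pvWtA_eq_subXor matrix (m : Int) (by omega)]
        simp [hval]
  rw [hfold]
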